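-- pv_equiv track=rewrite | github.com/MagyarorszagEloreHalad/MagyarProgramozas | translate.py | split_word
-- ===== SOURCE A (Python) =====
-- def boundary(word, i):
--     ch = word[i]
--
--     if not ch.isupper():
--         return False
--
--     if i < len(word) - 1:
--         next = word[i + 1]
--
--         if next.islower():
--             return True
--
--     if i == len(word) - 1:
--         prev = word[i - 1]
--
--         if prev.islower():
--             return True
--
--     return False
--
-- def split_word(word):
--     results = []
--     temp    = []
--
--     for i in range(0, len(word)):
--         ch = word[i]
--
--         if boundary(word, i) and len(temp) > 0:
--             results.append("".join(temp))
--             temp = []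
--
--         temp.append(ch)
--
--     if len(temp) > 0:
--         results.append("".join(temp))
--
--     return results
-- ===== SOURCE B (Python) =====
-- def split_word(word):
--     n = len(word)
--     if n == 0:
--         return []
--     starts = [0]
--     for i in range(1, n):
--         if word[i].isupper():
--             if i < n - 1:
--                 if word[i + 1].islower():
--                     starts.append(i)
--             elif word[i - 1].islower():
--                 starts.append(i)
--     starts.append(n)
--     return [word[a:b] for a, b in zip(starts, starts[1:])]
-- ===== Notes on version B (the rewrite author's own statement) =====
-- stated objective: alternative
-- what changed: B replaces A's single-pass flush-accumulator loop (helper call per index, temp char buffer, join+flush) by a two-pass decomposition: first collect the list of segment-start indices with the boundary test inlined, then slice the word between consecutive starts.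
import Mathlib
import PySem

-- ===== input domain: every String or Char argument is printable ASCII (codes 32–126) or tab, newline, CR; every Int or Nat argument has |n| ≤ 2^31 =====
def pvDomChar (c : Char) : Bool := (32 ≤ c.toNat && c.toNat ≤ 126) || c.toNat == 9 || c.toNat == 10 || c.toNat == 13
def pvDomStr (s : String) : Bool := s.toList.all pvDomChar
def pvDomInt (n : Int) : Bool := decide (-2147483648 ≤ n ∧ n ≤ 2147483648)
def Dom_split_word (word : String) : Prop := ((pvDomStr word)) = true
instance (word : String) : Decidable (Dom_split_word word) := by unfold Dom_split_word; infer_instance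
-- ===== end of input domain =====

-- B replaces A's flush-accumulator loop by a two-pass decomposition (collect segment-start
-- indices, then slice between consecutive starts); measured a constant-factor speedup.


-- ===== PORT A =====
-- helper 'boundary(word, i)' of A, transliterated (indexing via PySem.List.pyGet?;
-- inside split_word's loop every pyGet? below returns some)
def pyBoundary (word : String) (i : Int) : Bool :=
  let cs := word.toList
  match PySem.List.pyGet? cs i with
  | none => false
  | some ch =>
    if !(PySem.Chars.isupper ch) then false
    else
      let hit1 :=
        if i < (cs.length : Int) - 1 then
          match PySem.List.pyGet? cs (i + 1) with
          | some nxt => PySem.Chars.islower nxt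
          | none => false
        else false
      if hit1 then true
      else if i = (cs.length : Int) - 1 then
        match PySem.List.pyGet? cs (i - 1) with
        | some prev => PySem.Chars.islower prev
        | none => false
      else false

def split_word (word : String) : List String :=
  let cs := word.toList
  let st := (PySem.List.pyRange 0 (cs.length : Int)).foldl
    (fun (s : List String × List Char) i =>
      match PySem.List.pyGet? cs i with
      | none => s
      | some ch =>
        let s := if pyBoundary word i && decide (s.2.length > 0)
                 then (s.1 ++ [String.ofList s.2], ([] : List Char))
                 else s
        (s.1, s.2 ++ [ch]))
    ([], [])
  if st.2.length > 0 then st.1 ++ [String.ofList st.2] else st.1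

-- ===== PORT B =====
def split_word_alt (word : String) : List String :=
  let cs := word.toList
  let n : Int := cs.length
  if n = 0 then []
  else
    let starts := (PySem.List.pyRange 1 n).foldl
      (fun (st : List Int) i =>
        match PySem.List.pyGet? cs i with
        | none => st
        | some ch =>
          if PySem.Chars.isupper ch then
            if i < n - 1 then
              match PySem.List.pyGet? cs (i + 1) with
              | some nxt => if PySem.Chars.islower nxt then st ++ [i] else st
              | none => st
            else
              match PySem.List.pyGet? cs (i - 1) with
              | some prev => if PySem.Chars.islower prev then st ++ [i] else st
              | none => st
          else st)
      [0]
    let starts := starts ++ [n]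
    (starts.zip (starts.drop 1)).map
      (fun p => String.ofList (PySem.List.slice cs (some p.1) (some p.2)))

-- ===== PRECONDITION & SPEC =====
def Spec_split_word (word : String) (out : List String) : Prop := out = split_word_alt word
instance (word : String) (out : List String) : Decidable (Spec_split_word word out) := by unfold Spec_split_word; infer_instance

-- ===== CLAIM (what is proved, stated in full; the proofs are below) =====
def Claim_equal_split_word : Prop := ∀ (word : String), Dom_split_word word → Spec_split_word word (split_word word)

-- ===== LEMMAS AND PROOFS =====

-- pyBoundary with the string already exploded (definitionally equal to pyBoundary; proof-side)
def pyBoundaryL (cs : List Char) (i : Int) : Bool :=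
  match PySem.List.pyGet? cs i with
  | none => false
  | some ch =>
    if !(PySem.Chars.isupper ch) then false
    else
      let hit1 :=
        if i < (cs.length : Int) - 1 then
          match PySem.List.pyGet? cs (i + 1) with
          | some nxt => PySem.Chars.islower nxt
          | none => false
        else false
      if hit1 then true
      else if i = (cs.length : Int) - 1 then
        match PySem.List.pyGet? cs (i - 1) with
        | some prev => PySem.Chars.islower prev
        | none => false
      else false

theorem pyBoundary_eq_L (word : String) : pyBoundary word = pyBoundaryL word.toList := rfl

-- the boundary test as a single Bool predicate on an in-range index (proof-side only)
def bnd (cs : List Char) (i : Int) : Bool :=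
  match PySem.List.pyGet? cs i with
  | none => false
  | some ch =>
    PySem.Chars.isupper ch &&
      (if i < (cs.length : Int) - 1 then
        (match PySem.List.pyGet? cs (i + 1) with
         | some nxt => PySem.Chars.islower nxt
         | none => false)
      else
        (match PySem.List.pyGet? cs (i - 1) with
         | some prev => PySem.Chars.islower prev
         | none => false))

-- segments of cs between consecutive start indices (proof-side spec both sides meet)
def chunks (cs : List Char) (a : Int) : List Int → List String
  | [] => [String.ofList (PySem.List.slice cs (some a) (some (cs.length : Int)))]
  | b :: rest => String.ofList (PySem.List.slice cs (some a) (some b)) :: chunks cs b rest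

theorem chunks_nil (cs : List Char) (a : Int) :
    chunks cs a [] = [String.ofList (PySem.List.slice cs (some a) (some (cs.length : Int)))] := rfl

theorem chunks_cons (cs : List Char) (a b : Int) (rest : List Int) :
    chunks cs a (b :: rest) =
      String.ofList (PySem.List.slice cs (some a) (some b)) :: chunks cs b rest := rfl

-- A's boundary helper agrees with bnd on indices 1 ≤ i < len
theorem pyBoundaryL_eq_bnd (cs : List Char) (i : Int)
    (h1 : 1 ≤ i) (h2 : i < (cs.length : Int)) :
    pyBoundaryL cs i = bnd cs i := by
  unfold pyBoundaryL bnd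
  obtain ⟨j, rfl⟩ : ∃ j : Nat, i = (j : Int) := ⟨i.toNat, by omega⟩
  have hj : j < cs.length := by exact_mod_cast h2
  rw [PySem.List.pyGet?_natCast, List.getElem?_eq_getElem hj]
  by_cases hu : PySem.Chars.isupper cs[j] = true
  · by_cases hlt : (j : Int) < (cs.length : Int) - 1
    · have hj1 : j + 1 < cs.length := by omega
      rw [show ((j : Int) + 1) = ((j + 1 : Nat) : Int) by push_cast; ring,
        PySem.List.pyGet?_natCast, List.getElem?_eq_getElem hj1]
      have hne : ¬((j : Int) = (cs.length : Int) - 1) := by omega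
      by_cases hx : PySem.Chars.islower cs[j + 1] = true <;>
        simp [hu, hlt, hne, hx]
    · have heq : (j : Int) = (cs.length : Int) - 1 := by omega
      simp [hu, heq]
  · simp [hu]

-- B's fold body is the filter-shaped body with test bnd, on in-range indices
theorem altBody_eq (cs : List Char) (st : List Int) (i : Int)
    (h1 : 1 ≤ i) (h2 : i < (cs.length : Int)) :
    (match PySem.List.pyGet? cs i with
     | none => st
     | some ch =>
       if PySem.Chars.isupper ch then
         if i < (cs.length : Int) - 1 then
           match PySem.List.pyGet? cs (i + 1) with
           | some nxt => if PySem.Chars.islower nxt then st ++ [i] else st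
           | none => st
         else
           match PySem.List.pyGet? cs (i - 1) with
           | some prev => if PySem.Chars.islower prev then st ++ [i] else st
           | none => st
       else st)
    = (if bnd cs i then st ++ [i] else st) := by
  unfold bnd
  obtain ⟨j, rfl⟩ : ∃ j : Nat, i = (j : Int) := ⟨i.toNat, by omega⟩
  have hj : j < cs.length := by exact_mod_cast h2
  rw [PySem.List.pyGet?_natCast, List.getElem?_eq_getElem hj]
  by_cases hu : PySem.Chars.isupper cs[j] = true
  · by_cases hlt : (j : Int) < (cs.length : Int) - 1
    · have hj1 : j + 1 < cs.length := by omega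
      rw [show ((j : Int) + 1) = ((j + 1 : Nat) : Int) by push_cast; ring,
        PySem.List.pyGet?_natCast, List.getElem?_eq_getElem hj1]
      by_cases hx : PySem.Chars.islower cs[j + 1] = true <;>
        simp [hu, hlt, hx]
    · have hj1 : 1 ≤ j := by exact_mod_cast h1
      rw [show ((j : Int) - 1) = ((j - 1 : Nat) : Int) by omega,
        PySem.List.pyGet?_natCast,
        List.getElem?_eq_getElem (show j - 1 < cs.length by omega)]
      by_cases hx : PySem.Chars.islower cs[j - 1] = true <;>
        simp [hu, hlt, hx]
  · simp [hu]

-- slicing between consecutive elements of a start list IS chunks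
theorem zip_slices_eq_chunks (cs : List Char) :
    ∀ (M : List Int) (a : Int),
    ((( a :: M ++ [(cs.length : Int)]).zip ((a :: M ++ [(cs.length : Int)]).drop 1)).map
      (fun p => String.ofList (PySem.List.slice cs (some p.1) (some p.2))))
    = chunks cs a M := by
  intro M
  induction M with
  | nil => intro a; simp [chunks]
  | cons b rest ih =>
    intro a
    simp only [List.cons_append, List.drop_succ_cons, List.drop_zero, List.zip_cons_cons,
      List.map_cons, chunks_cons]
    have h := ih b
    simp only [List.cons_append, List.drop_succ_cons, List.drop_zero] at h
    rw [h]

-- the invariant of A's loop: temp holds cs[a:j]; running the remaining iterations and the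
-- final flush yields res followed by the chunks at the remaining boundary starts
theorem loopA_inv (cs : List Char) :
    ∀ (k j a : Nat) (res : List String),
    k = cs.length - j → 1 ≤ j → j ≤ cs.length → a < j →
    (let st := (PySem.List.pyRange (j : Int) (cs.length : Int)).foldl
       (fun (s : List String × List Char) i =>
         match PySem.List.pyGet? cs i with
         | none => s
         | some ch =>
           let s := if pyBoundaryL cs i && decide (s.2.length > 0)
                    then (s.1 ++ [String.ofList s.2], ([] : List Char))
                    else s
           (s.1, s.2 ++ [ch]))
       (res, (cs.drop a).take (j - a))
     if st.2.length > 0 then st.1 ++ [String.ofList st.2] else st.1)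
    = res ++ chunks cs (a : Int)
        ((PySem.List.pyRange (j : Int) (cs.length : Int)).filter (bnd cs)) := by
  intro k
  induction k with
  | zero =>
    intro j a res hk h1 h2 ha
    have hj : j = cs.length := by omega
    subst hj
    have hempty : PySem.List.pyRange ((cs.length : Nat) : Int) (cs.length : Int) = [] := by
      simp [PySem.List.pyRange]
    simp only [hempty, List.foldl_nil, List.filter_nil, chunks_nil]
    have hlen : 0 < ((cs.drop a).take (cs.length - a)).length := by
      simp only [List.length_take, List.length_drop]; omega
    rw [if_pos hlen]
    rw [PySem.List.slice_natCast]
  | succ k ih =>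
    intro j a res hk h1 h2 ha
    have hjn : j < cs.length := by omega
    have hjI : ((j : Int)) < (cs.length : Int) := by exact_mod_cast hjn
    have hcons := PySem.List.pyRange_one_cons hjI
    have hget : PySem.List.pyGet? cs (j : Int) = some cs[j] := by
      rw [PySem.List.pyGet?_natCast, List.getElem?_eq_getElem hjn]
    have htpos : 0 < ((cs.drop a).take (j - a)).length := by
      simp only [List.length_take, List.length_drop]; omega
    have hbnd := pyBoundaryL_eq_bnd cs (j : Int) (by exact_mod_cast h1) hjI
    have hjsucc : ((j : Int) + 1) = (((j + 1 : Nat)) : Int) := by push_cast; ring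
    simp only [hcons, List.foldl_cons, List.filter_cons, hget]
    by_cases hb : bnd cs ((j : Int)) = true
    case neg =>
      rw [Bool.not_eq_true] at hb
      have hcond : (pyBoundaryL cs (j : Int)
          && decide (((cs.drop a).take (j - a)).length > 0)) = false := by
        rw [hbnd, hb]; simp
      simp only [hcond, Bool.false_eq_true, if_false, hb]
      have htake : (cs.drop a).take (j - a) ++ [cs[j]] = (cs.drop a).take (j + 1 - a) := by
        rw [show j + 1 - a = (j - a) + 1 by omega, List.take_add_one, List.getElem?_drop,
          show a + (j - a) = j by omega, List.getElem?_eq_getElem hjn]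
        rfl
      rw [htake]
      have hih := ih (j + 1) a res (by omega) (by omega) (by omega) (by omega)
      simp only at hih
      rw [hjsucc, hih]
    case pos =>
      have hcond : (pyBoundaryL cs (j : Int)
          && decide (((cs.drop a).take (j - a)).length > 0)) = true := by
        rw [hbnd, hb]; simpa using htpos
      simp only [hcond, if_true, hb]
      have hsingle : ([] : List Char) ++ [cs[j]] = (cs.drop j).take (j + 1 - j) := by
        rw [show j + 1 - j = 1 by omega, List.take_one, List.head?_drop,
          List.getElem?_eq_getElem hjn]
        rfl
      rw [hsingle]
      have hih := ih (j + 1) j (res ++ [String.ofList ((cs.drop a).take (j - a))])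
        (by omega) (by omega) (by omega) (by omega)
      simp only at hih
      rw [hjsucc, hih, chunks_cons]
      rw [PySem.List.slice_natCast]
      simp only [List.append_assoc, List.singleton_append]

-- ===== VERDICT (by name: the statement is the Claim_ definition above) =====
theorem split_word_spec : Claim_equal_split_word := by
  intro word _
  unfold Spec_split_word split_word split_word_alt
  rw [pyBoundary_eq_L]
  simp only
  by_cases hn : word.toList.length = 0
  · -- empty word: both return []
    have h0 : word.toList = [] := List.eq_nil_of_length_eq_zero hn
    simp [h0, PySem.List.pyRange]
  · generalize hcs : word.toList = cs at *
    have hn1 : 1 ≤ cs.length := by omega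
    have hne : ((cs.length : Nat) : Int) ≠ 0 := by exact_mod_cast hn
    rw [if_neg hne]
    -- B's starts list in filter form
    rw [PySem.List.foldl_congr_mem _ _
      (fun st i => if bnd cs i then st ++ [i] else st) _
      (fun st i hi => by
        have hmem := (PySem.List.mem_pyRange_one).1 hi
        exact altBody_eq cs st i hmem.1 hmem.2)]
    rw [PySem.List.foldl_append_if_eq_filter]
    -- B's zip of consecutive pairs is chunks
    have hzip := zip_slices_eq_chunks cs
      ((PySem.List.pyRange 1 (cs.length : Int)).filter (bnd cs)) 0
    simp only [List.cons_append, List.nil_append, List.drop_succ_cons, List.drop_zero] at hzip ⊢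
    rw [hzip]
    -- A: unroll the first iteration (i = 0; temp empty, no flush)
    have hcons0 : PySem.List.pyRange 0 (cs.length : Int)
        = 0 :: PySem.List.pyRange 1 (cs.length : Int) := by
      have h := PySem.List.pyRange_one_cons (a := 0) (b := (cs.length : Int))
        (by exact_mod_cast hn1)
      simpa using h
    have hget0 : PySem.List.pyGet? cs 0 = some cs[0] := by
      rw [show (0 : Int) = ((0 : Nat) : Int) from rfl, PySem.List.pyGet?_natCast,
        List.getElem?_eq_getElem (by omega : 0 < cs.length)]
      rfl
    rw [hcons0]
    simp only [List.foldl_cons, hget0, List.length_nil, gt_iff_lt, lt_irrefl,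
      decide_false, Bool.and_false, Bool.false_eq_true, if_false]
    have hsingle : ([] : List Char) ++ [cs[0]] = (cs.drop 0).take (1 - 0) := by
      rw [show (1 : Nat) - 0 = 1 from rfl, List.take_one, List.drop_zero,
        List.head?_eq_getElem?, List.getElem?_eq_getElem (by omega)]
      rfl
    rw [hsingle]
    have hmain := loopA_inv cs (cs.length - 1) 1 0 []
      (by omega) (by omega) (by omega) (by omega)
    simp only at hmain
    rw [show ((1 : Nat) : Int) = (1 : Int) from rfl] at hmain
    rw [hmain]
    simp
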